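-- pv_equiv track=rewrite | github.com/walkccc/LeetCode | solutions/1371. Find the Longest Substring Containing Vowels in Even Counts/1371.py | findTheLongestSubstring
-- ===== SOURCE A (Python) =====
-- def findTheLongestSubstring(s: str) -> int:
--   kVowels = 'aeiou'
--   ans = 0
--   prefix = 0  # the binary prefix
--   prefixToIndex = {0: -1}
--
--   for i, c in enumerate(s):
--     index = kVowels.find(c)
--     if index != -1:
--       prefix ^= 1 << index
--     prefixToIndex.setdefault(prefix, i)
--     ans = max(ans, i - prefixToIndex[prefix])
--
--   return ans
-- ===== SOURCE B (Python) =====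
-- def findTheLongestSubstring(s: str) -> int:
--   vowels = 'aeiou'
--   ans = 0
--   for i in range(len(s)):
--     mask = 0
--     length = 0
--     for c in s[i:]:
--       if c in vowels:
--         mask ^= 1 << vowels.find(c)
--       length += 1
--       if mask == 0:
--         ans = max(ans, length)
--   return ans
-- ===== Notes on version B (the rewrite author's own statement) =====
-- stated objective: alternative
-- what changed: Replaced A's one-pass prefix-parity XOR with an earliest-index hashmap by a brute-force quadratic scan: for each start index, extend the window character by character flipping a vowel-parity mask and record the window length whenever the mask is zero.
import Mathlib
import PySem

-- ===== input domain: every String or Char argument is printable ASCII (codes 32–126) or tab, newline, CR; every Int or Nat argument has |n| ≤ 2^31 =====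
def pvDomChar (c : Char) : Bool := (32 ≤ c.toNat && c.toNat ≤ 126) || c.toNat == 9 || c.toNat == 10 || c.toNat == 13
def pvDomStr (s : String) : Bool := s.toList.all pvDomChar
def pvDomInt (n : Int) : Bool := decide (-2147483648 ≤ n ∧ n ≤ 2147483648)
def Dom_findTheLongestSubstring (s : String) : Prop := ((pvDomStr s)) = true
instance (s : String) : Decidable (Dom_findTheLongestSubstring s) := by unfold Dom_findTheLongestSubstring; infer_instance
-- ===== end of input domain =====

-- B replaces A's prefix-parity hashmap scan by an O(n²) brute-force scan over all start indices
-- (objective: alternative, not faster); both return the same value on every string.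

-- ===== PORT A =====
def findTheLongestSubstring (s : String) : Int :=
  let kVowels := "aeiou"
  let step := fun (st : Int × Int × PySem.Dict Int Int) (ic : Int × Char) =>
    let ans := st.1
    let pfx := st.2.1
    let d := st.2.2
    let index := PySem.Str.find kVowels (String.ofList [ic.2])
    -- index ≥ 0 in the then-branch, so '.toNat' is exact for Python's '1 << index'
    let pfx := if index ≠ -1 then PySem.Int.bxor pfx ((1 : Int) <<< index.toNat) else pfx
    let d := d.setdefault pfx ic.1
    -- the key 'pfx' is always present after setdefault, so getD's default is never used
    let ans := max ans (ic.1 - d.getD pfx 0)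
    (ans, pfx, d)
  ((PySem.List.enumerate s.toList).foldl step
    (0, 0, PySem.Dict.ofList [((0 : Int), (-1 : Int))])).1

-- ===== PORT B =====
def findTheLongestSubstring_alt (s : String) : Int :=
  let vowels := "aeiou"
  let cs := s.toList
  (PySem.List.pyRange 0 cs.length 1).foldl (fun ans i =>
    let inner := (PySem.List.slice cs (some i) none).foldl
      (fun (st : Int × Int × Int) c =>
        let ans := st.1
        let mask := st.2.1
        let length := st.2.2
        let mask := if PySem.Str.isIn (String.ofList [c]) vowels then
            PySem.Int.bxor mask ((1 : Int) <<< (PySem.Str.find vowels (String.ofList [c])).toNat)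
          else mask
        let length := length + 1
        let ans := if mask == 0 then max ans length else ans
        (ans, mask, length))
      (ans, 0, 0)
    inner.1) 0

-- ===== PRECONDITION & SPEC =====
def Spec_findTheLongestSubstring (s : String) (out : Int) : Prop := out = findTheLongestSubstring_alt s
instance (s : String) (out : Int) : Decidable (Spec_findTheLongestSubstring s out) := by unfold Spec_findTheLongestSubstring; infer_instance

-- ===== CLAIM (what is proved, stated in full; the proofs are below) =====
def Claim_equal_findTheLongestSubstring : Prop := ∀ (s : String), Dom_findTheLongestSubstring s → Spec_findTheLongestSubstring s (findTheLongestSubstring s)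

-- ===== LEMMAS AND PROOFS =====

-- parity bit of each vowel; 0 for a consonant
def vmask (c : Char) : Nat :=
  if c = 'a' then 1 else if c = 'e' then 2 else if c = 'i' then 4
  else if c = 'o' then 8 else if c = 'u' then 16 else 0

-- vowel-parity mask of a list of characters
def pfx (l : List Char) : Nat := l.foldl (fun m c => m ^^^ vmask c) 0

-- mask of the first k characters
def pvP (cs : List Char) (k : Nat) : Nat := pfx (cs.take k)

theorem pvP_exists (cs : List Char) (m : Nat) : ∃ k, pvP cs k = pvP cs m := ⟨m, rfl⟩

-- earliest index whose prefix mask equals that of index m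
def pvFirst (cs : List Char) (m : Nat) : Nat := Nat.find (pvP_exists cs m)

def pvG (cs : List Char) (m : Nat) : Nat := m - pvFirst cs m

-- the value A computes: best (m - earliest index with the same mask) over all prefix ends m
def pvS (cs : List Char) : Nat := Finset.sup (Finset.range (cs.length + 1)) (pvG cs)

-- best window length among windows starting at i (end index m, i < m ≤ n, equal masks)
def pvT (cs : List Char) (i : Nat) : Nat :=
  Finset.sup ((Finset.Icc (i + 1) cs.length).filter (fun m => pvP cs m = pvP cs i)) (fun m => m - i)

-- the value B computes
def pvU (cs : List Char) : Nat := Finset.sup (Finset.range cs.length) (pvT cs)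

theorem pvFirst_le (cs : List Char) (m : Nat) : pvFirst cs m ≤ m := Nat.find_min' _ rfl

theorem pvP_pvFirst (cs : List Char) (m : Nat) : pvP cs (pvFirst cs m) = pvP cs m :=
  Nat.find_spec (pvP_exists cs m)

theorem pvFirst_le_of_eq (cs : List Char) {i m : Nat} (h : pvP cs i = pvP cs m) :
    pvFirst cs m ≤ i := Nat.find_min' _ h

theorem pvFirst_congr (cs : List Char) {i m : Nat} (h : pvP cs i = pvP cs m) :
    pvFirst cs i = pvFirst cs m := by
  apply le_antisymm
  · exact Nat.find_min' _ ((pvP_pvFirst cs m).trans h.symm)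
  · exact Nat.find_min' _ ((pvP_pvFirst cs i).trans h)

theorem pvP_succ (cs : List Char) (t : Nat) (h : t < cs.length) :
    pvP cs (t + 1) = pvP cs t ^^^ vmask cs[t] := by
  have : cs.take (t + 1) = cs.take t ++ [cs[t]] := by
    rw [List.take_add_one, List.getElem?_eq_getElem h, Option.toList_some]
  rw [pvP, this, pfx, List.foldl_append]
  rfl

-- A's maximum (over prefix ends) equals B's maximum (over window starts)
theorem U_eq_S (cs : List Char) : pvU cs = pvS cs := by
  apply le_antisymm
  · apply Finset.sup_le
    intro i hi
    apply Finset.sup_le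
    intro m hm
    simp only [Finset.mem_filter, Finset.mem_Icc] at hm
    obtain ⟨⟨him, hmn⟩, hPm⟩ := hm
    have h1 : pvFirst cs m ≤ i := pvFirst_le_of_eq cs hPm.symm
    calc m - i ≤ m - pvFirst cs m := Nat.sub_le_sub_left h1 m
      _ = pvG cs m := rfl
      _ ≤ pvS cs := Finset.le_sup (Finset.mem_range.mpr (by omega))
  · apply Finset.sup_le
    intro m hm
    simp only [Finset.mem_range] at hm
    by_cases h : pvFirst cs m = m
    · simp [pvG, h]
    · have hlt : pvFirst cs m < m := lt_of_le_of_ne (pvFirst_le cs m) h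
      have h2 : pvG cs m ≤ pvT cs (pvFirst cs m) := by
        apply Finset.le_sup (f := fun x => x - pvFirst cs m)
        simp only [Finset.mem_filter, Finset.mem_Icc]
        exact ⟨⟨hlt, by omega⟩, pvP_pvFirst cs m ▸ rfl⟩
      exact le_trans h2 (Finset.le_sup (Finset.mem_range.mpr (by omega)))

theorem shift_cast (k : Nat) : ((1:Int) <<< k) = ((1 <<< k : Nat) : Int) := by
  simp [Int.shiftLeft_eq, Nat.shiftLeft_eq]

theorem find_of_not_vowel {c : Char} (hc : c ∉ ['a','e','i','o','u']) :
    PySem.Str.find "aeiou" (String.ofList [c]) = -1 := by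
  rw [PySem.Str.find_eq_neg_one_iff]
  intro hinf
  rw [String.toList_ofList] at hinf
  exact hc (by simpa using hinf.subset (by simp : c ∈ [c]))

theorem vmask_of_not_vowel {c : Char} (hc : c ∉ ['a','e','i','o','u']) : vmask c = 0 := by
  simp only [List.mem_cons, not_or] at hc
  simp [vmask, hc.1, hc.2.1, hc.2.2.1, hc.2.2.2.1, hc.2.2.2.2]

-- A's per-character update is xor with the vowel mask
theorem stepA_char (m : Nat) (c : Char) :
    (if PySem.Str.find "aeiou" (String.ofList [c]) ≠ -1 then
        PySem.Int.bxor ↑m ((1 : Int) <<< (PySem.Str.find "aeiou" (String.ofList [c])).toNat)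
      else (↑m : Int)) = ↑(m ^^^ vmask c) := by
  by_cases hc : c ∈ ['a','e','i','o','u']
  · fin_cases hc <;>
      rw [if_pos (by decide), shift_cast, PySem.Int.bxor_natCast] <;>
      (norm_num [vmask]; decide)
  · rw [find_of_not_vowel hc, vmask_of_not_vowel hc]
    simp

-- B's per-character update is xor with the vowel mask
theorem stepB_char (m : Nat) (c : Char) :
    (if PySem.Str.isIn (String.ofList [c]) "aeiou" then
        PySem.Int.bxor ↑m ((1 : Int) <<< (PySem.Str.find "aeiou" (String.ofList [c])).toNat)
      else (↑m : Int)) = ↑(m ^^^ vmask c) := by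
  by_cases hc : c ∈ ['a','e','i','o','u']
  · fin_cases hc <;>
      rw [if_pos (by decide), shift_cast, PySem.Int.bxor_natCast] <;>
      (norm_num [vmask]; decide)
  · have hin : ¬ (PySem.Str.isIn (String.ofList [c]) "aeiou" = true) := by
      intro h
      rw [PySem.Str.isIn_iff_infix, String.toList_ofList] at h
      exact hc (by simpa using h.subset (by simp : c ∈ [c]))
    rw [if_neg hin, vmask_of_not_vowel hc]
    simp

-- A's dict after t characters: first-occurrence index (minus one) of every mask seen so far
def DictInv (cs : List Char) (t : Nat) (d : PySem.Dict Int Int) : Prop :=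
  (∀ m : Nat, m ≤ t → d.get? ↑(pvP cs m) = some ((pvFirst cs m : Int) - 1)) ∧
  (∀ v : Int, (∀ k : Nat, k ≤ t → (↑(pvP cs k) : Int) ≠ v) → d.get? v = none)

theorem dict_step (cs : List Char) (t : Nat) (d : PySem.Dict Int Int) (hDI : DictInv cs t d) :
    DictInv cs (t + 1) (d.setdefault ↑(pvP cs (t + 1)) ↑t) ∧
    (d.setdefault ↑(pvP cs (t + 1)) ↑t).getD ↑(pvP cs (t + 1)) 0
      = (pvFirst cs (t + 1) : Int) - 1 := by
  have hsd := PySem.Dict.get?_setdefault_self d (↑(pvP cs (t + 1)) : Int) (↑t : Int)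
  by_cases hex : ∃ k, k ≤ t ∧ pvP cs k = pvP cs (t + 1)
  · obtain ⟨k, hk, hPk⟩ := hex
    have h1 := hDI.1 k hk
    rw [show ((pvP cs k : Int)) = ↑(pvP cs (t + 1)) from by exact_mod_cast hPk] at h1
    have hfk : pvFirst cs k = pvFirst cs (t + 1) := pvFirst_congr cs hPk
    rw [h1] at hsd
    have hget : (d.setdefault ↑(pvP cs (t + 1)) ↑t).get? ↑(pvP cs (t + 1))
        = some ((pvFirst cs (t + 1) : Int) - 1) := by
      rw [hsd, hfk]
      rfl
    refine ⟨⟨?_, ?_⟩, ?_⟩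
    · intro m hm
      by_cases hKm : pvP cs m = pvP cs (t + 1)
      · rw [show ((pvP cs m : Int)) = ↑(pvP cs (t + 1)) from by exact_mod_cast hKm,
          hget, pvFirst_congr cs hKm]
      · have hne : ((pvP cs m : Int)) ≠ ↑(pvP cs (t + 1)) := fun h => hKm (by exact_mod_cast h)
        have hm' : m ≤ t := by
          rcases Nat.lt_or_ge m (t + 1) with h | h
          · omega
          · exact absurd (by omega : m = t + 1) (fun h' => hKm (h' ▸ rfl))
        rw [PySem.Dict.get?_setdefault_of_ne d _ hne]
        exact hDI.1 m hm'
    · intro v hv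
      have hne : ((pvP cs (t + 1) : Int)) ≠ v := hv (t + 1) le_rfl
      rw [PySem.Dict.get?_setdefault_of_ne d _ (Ne.symm hne)]
      exact hDI.2 v (fun k hk => hv k (by omega))
    · rw [PySem.Dict.getD, hget]
      rfl
  · push Not at hex
    have hnone : d.get? ↑(pvP cs (t + 1)) = none := by
      apply hDI.2
      intro k hk h
      exact hex k hk (by exact_mod_cast h)
    rw [hnone] at hsd
    have hf : pvFirst cs (t + 1) = t + 1 := by
      apply le_antisymm (pvFirst_le cs (t + 1))
      by_contra h
      push Not at h
      exact hex _ (by omega) (pvP_pvFirst cs (t + 1))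
    have hget : (d.setdefault ↑(pvP cs (t + 1)) ↑t).get? ↑(pvP cs (t + 1))
        = some ((pvFirst cs (t + 1) : Int) - 1) := by
      rw [hsd, hf]
      push_cast
      norm_num
    refine ⟨⟨?_, ?_⟩, ?_⟩
    · intro m hm
      by_cases hKm : pvP cs m = pvP cs (t + 1)
      · rw [show ((pvP cs m : Int)) = ↑(pvP cs (t + 1)) from by exact_mod_cast hKm,
          hget, pvFirst_congr cs hKm]
      · have hne : ((pvP cs m : Int)) ≠ ↑(pvP cs (t + 1)) := fun h => hKm (by exact_mod_cast h)
        have hm' : m ≤ t := by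
          rcases Nat.lt_or_ge m (t + 1) with h | h
          · omega
          · exact absurd (by omega : m = t + 1) (fun h' => hKm (h' ▸ rfl))
        rw [PySem.Dict.get?_setdefault_of_ne d _ hne]
        exact hDI.1 m hm'
    · intro v hv
      have hne : ((pvP cs (t + 1) : Int)) ≠ v := hv (t + 1) le_rfl
      rw [PySem.Dict.get?_setdefault_of_ne d _ (Ne.symm hne)]
      exact hDI.2 v (fun k hk => hv k (by omega))
    · rw [PySem.Dict.getD, hget]
      rfl

theorem A_loop (cs : List Char) (rest : List Char) :
    ∀ (t : Nat) (ans : Int) (d : PySem.Dict Int Int),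
    t ≤ cs.length → cs.drop t = rest →
    ans = ↑(Finset.sup (Finset.range (t + 1)) (pvG cs)) →
    DictInv cs t d →
    ((PySem.List.enumerate rest ↑t).foldl
      (fun (st : Int × Int × PySem.Dict Int Int) (ic : Int × Char) =>
        let ans := st.1
        let pfx := st.2.1
        let d := st.2.2
        let index := PySem.Str.find "aeiou" (String.ofList [ic.2])
        let pfx := if index ≠ -1 then PySem.Int.bxor pfx ((1 : Int) <<< index.toNat) else pfx
        let d := d.setdefault pfx ic.1
        let ans := max ans (ic.1 - d.getD pfx 0)
        (ans, pfx, d))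
      (ans, ↑(pvP cs t), d)).1 = ↑(pvS cs) := by
  induction rest with
  | nil =>
    intro t ans d hle hdrop hans _
    have hlen : t = cs.length := by
      have := List.drop_eq_nil_iff.mp hdrop
      omega
    simp only [PySem.List.enumerate_nil, List.foldl_nil, hans, hlen, pvS]
  | cons c rest' ih =>
    intro t ans d hle hdrop hans hDI
    have hlt : t < cs.length := by
      by_contra hge
      rw [List.drop_eq_nil_iff.mpr (by omega)] at hdrop
      simp at hdrop
    have hc : c = cs[t] := by
      have h1 := List.getElem?_drop (xs := cs) (i := t) (j := 0)
      rw [hdrop] at h1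
      rw [Nat.add_zero, List.getElem?_eq_getElem hlt] at h1
      exact (Option.some_inj.mp h1.symm).symm
    have hdrop' : cs.drop (t + 1) = rest' := by
      rw [← List.tail_drop, hdrop]
      rfl
    rw [PySem.List.enumerate_cons, List.foldl_cons]
    dsimp only
    rw [stepA_char, hc, ← pvP_succ cs t hlt]
    obtain ⟨hDI', hL⟩ := dict_step cs t d hDI
    rw [hL]
    have hfle := pvFirst_le cs (t + 1)
    have hansval : max ans ((↑t : Int) - ((pvFirst cs (t + 1) : Int) - 1))
        = ↑(Finset.sup (Finset.range (t + 1 + 1)) (pvG cs)) := by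
      rw [hans, Finset.range_add_one (n := t + 1), Finset.sup_insert]
      have hg : ((pvG cs (t + 1) : Nat) : Int) = (↑t : Int) - ((pvFirst cs (t + 1) : Int) - 1) := by
        rw [pvG, Nat.cast_sub hfle]
        push_cast
        ring
      push_cast [Nat.cast_max, ← hg]
      omega
    rw [hansval]
    have := ih (t + 1) _ _ (by omega) hdrop' rfl hDI'
    rw [show ((t : Int) + 1) = ((t + 1 : Nat) : Int) from by push_cast; ring]
    exact this

theorem dictinv_init (cs : List Char) :
    DictInv cs 0 (PySem.Dict.ofList [((0 : Int), (-1 : Int))]) := by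
  have hP0 : pvP cs 0 = 0 := rfl
  have hf0 : pvFirst cs 0 = 0 := Nat.le_zero.mp (pvFirst_le cs 0)
  constructor
  · intro m hm
    interval_cases m
    rw [hP0, hf0]
    decide
  · intro v hv
    have h0 : (0 : Int) ≠ v := by
      have := hv 0 le_rfl
      rwa [hP0] at this
    rw [show PySem.Dict.ofList [((0 : Int), (-1 : Int))]
        = PySem.Dict.mk [((0 : Int), (-1 : Int))] from rfl, PySem.Dict.get?_mk_cons]
    rw [if_neg (by simpa using h0)]
    rfl

theorem A_eq (s : String) : findTheLongestSubstring s = ↑(pvS s.toList) := by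
  unfold findTheLongestSubstring
  dsimp only
  have h := A_loop s.toList (s.toList) 0 0 (PySem.Dict.ofList [((0 : Int), (-1 : Int))])
    (by omega) rfl (by simp [pvG, Nat.le_zero.mp (pvFirst_le s.toList 0)]) (dictinv_init s.toList)
  simpa using h

theorem B_inner (cs : List Char) (i : Nat) (rest : List Char) :
    ∀ (j : Nat) (ans0 : Int), 0 ≤ ans0 → i + j ≤ cs.length → cs.drop (i + j) = rest →
    (rest.foldl
      (fun (st : Int × Int × Int) c =>
        let ans := st.1
        let mask := st.2.1
        let length := st.2.2
        let mask := if PySem.Str.isIn (String.ofList [c]) "aeiou" then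
            PySem.Int.bxor mask ((1 : Int) <<< (PySem.Str.find "aeiou" (String.ofList [c])).toNat)
          else mask
        let length := length + 1
        let ans := if mask == 0 then max ans length else ans
        (ans, mask, length))
      (max ans0 ↑(Finset.sup ((Finset.Icc (i + 1) (i + j)).filter (fun m => pvP cs m = pvP cs i))
          (fun m => m - i)),
        ↑(pvP cs (i + j) ^^^ pvP cs i), ↑j)).1
    = max ans0 ↑(pvT cs i) := by
  induction rest with
  | nil =>
    intro j ans0 h0 hle hdrop
    have hlen : i + j = cs.length := by
      have := List.drop_eq_nil_iff.mp hdrop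
      omega
    simp only [List.foldl_nil, pvT, ← hlen]
  | cons c rest' ih =>
    intro j ans0 h0 hle hdrop
    have hlt : i + j < cs.length := by
      by_contra hge
      rw [List.drop_eq_nil_iff.mpr (by omega)] at hdrop
      simp at hdrop
    have hc : c = cs[i + j] := by
      have h1 := List.getElem?_drop (xs := cs) (i := i + j) (j := 0)
      rw [hdrop] at h1
      rw [Nat.add_zero, List.getElem?_eq_getElem hlt] at h1
      exact (Option.some_inj.mp h1.symm).symm
    have hdrop' : cs.drop (i + (j + 1)) = rest' := by
      rw [show i + (j + 1) = (i + j) + 1 by omega, ← List.tail_drop, hdrop]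
      rfl
    rw [List.foldl_cons]
    dsimp only
    rw [stepB_char, hc]
    have hmask : (pvP cs (i + j) ^^^ pvP cs i) ^^^ vmask cs[i + j]
        = pvP cs (i + (j + 1)) ^^^ pvP cs i := by
      rw [show i + (j + 1) = (i + j) + 1 by omega, pvP_succ cs (i + j) hlt,
        Nat.xor_assoc, Nat.xor_comm (pvP cs i) (vmask cs[i + j]), ← Nat.xor_assoc]
    rw [hmask]
    have ihx := ih (j + 1) ans0 h0 (by omega) hdrop'
    have hicc : Finset.Icc (i + 1) (i + (j + 1)) = insert (i + (j + 1)) (Finset.Icc (i + 1) (i + j)) := by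
      rw [show i + (j + 1) = (i + j) + 1 by omega]
      exact (Finset.insert_Icc_right_eq_Icc_add_one (by omega)).symm
    by_cases hX : pvP cs (i + (j + 1)) = pvP cs i
    · have hz : pvP cs (i + (j + 1)) ^^^ pvP cs i = 0 := by
        rw [hX, Nat.xor_self]
      rw [hz] at ihx ⊢
      rw [hicc, Finset.filter_insert, if_pos hX, Finset.sup_insert] at ihx
      simp only [Nat.cast_zero, Nat.cast_max, show (i + (j + 1)) - i = j + 1 by omega] at ihx ⊢
      rw [show ((0:Int) == 0) = true from rfl, if_pos rfl]
      rw [show max ans0 (max (↑(j + 1) : Int) ↑(((Finset.Icc (i + 1) (i + j)).filter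
            (fun m => pvP cs m = pvP cs i)).sup (fun m => m - i)))
          = max (max ans0 ↑(((Finset.Icc (i + 1) (i + j)).filter
            (fun m => pvP cs m = pvP cs i)).sup (fun m => m - i))) ((↑j : Int) + 1) from by push_cast; omega] at ihx
      rw [show ((j : Int) + 1) = ((j + 1 : Nat) : Int) from by push_cast; ring]
      exact ihx
    · have hz : pvP cs (i + (j + 1)) ^^^ pvP cs i ≠ 0 := by
        intro h
        exact hX (Nat.xor_eq_zero_iff.mp h)
      rw [hicc, Finset.filter_insert, if_neg hX] at ihx
      rw [show ((↑(pvP cs (i + (j + 1)) ^^^ pvP cs i) : Int) == 0) = false from by simp [hz], if_neg (by simp)]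
      rw [show ((j : Int) + 1) = ((j + 1 : Nat) : Int) from by push_cast; ring]
      exact ihx

theorem B_outer (cs : List Char) : ∀ (k i : Nat), i + k = cs.length → ∀ ans : Int,
    ans = ↑(Finset.sup (Finset.range i) (pvT cs)) →
    ((List.range' i k).foldl (fun a (x : Nat) =>
      ((PySem.List.slice cs (some (x : Int)) none).foldl
        (fun (st : Int × Int × Int) c =>
          let ans := st.1
          let mask := st.2.1
          let length := st.2.2
          let mask := if PySem.Str.isIn (String.ofList [c]) "aeiou" then
              PySem.Int.bxor mask ((1 : Int) <<< (PySem.Str.find "aeiou" (String.ofList [c])).toNat)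
            else mask
          let length := length + 1
          let ans := if mask == 0 then max ans length else ans
          (ans, mask, length))
        (a, 0, 0)).1) ans) = ↑(pvU cs) := by
  intro k
  induction k with
  | zero =>
    intro i hik ans hans
    rw [List.range'_zero, List.foldl_nil, hans]
    rw [show i = cs.length by omega]
    rfl
  | succ k ihk =>
    intro i hik ans hans
    have h0 : 0 ≤ ans := by
      rw [hans]
      exact Int.natCast_nonneg _
    rw [List.range'_succ, List.foldl_cons]
    have hin := B_inner cs i (cs.drop i) 0 ans h0 (by omega) (by rw [Nat.add_zero])
    rw [show Finset.Icc (i + 1) (i + 0) = ∅ from Finset.Icc_eq_empty (by omega)] at hin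
    rw [Finset.filter_empty, Finset.sup_empty] at hin
    simp only [Nat.add_zero, Nat.xor_self, Nat.cast_zero, bot_eq_zero', max_eq_left h0] at hin
    rw [PySem.List.slice_from_natCast, hin]
    apply ihk (i + 1) (by omega)
    rw [hans, Finset.range_add_one, Finset.sup_insert, Nat.cast_max]
    omega

theorem B_eq (s : String) : findTheLongestSubstring_alt s = ↑(pvU s.toList) := by
  unfold findTheLongestSubstring_alt
  dsimp only
  rw [show (s.toList.length : Int) = ((s.toList.length : Nat) : Int) from rfl,
    PySem.List.pyRange_zero_natCast, List.foldl_map, List.range_eq_range']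
  exact B_outer s.toList s.toList.length 0 (by omega) 0 (by simp)

-- ===== VERDICT (by name: the statement is the Claim_ definition above) =====
theorem findTheLongestSubstring_spec : Claim_equal_findTheLongestSubstring := by
  intro s _
  unfold Spec_findTheLongestSubstring
  rw [A_eq, B_eq, U_eq_S]
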